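-- pv_equiv track=rewrite | github.com/nikhilmole/Python_Program_2 | Program139.py | StrCpyConvertCap
-- ===== SOURCE A (Python) =====
-- def StrCpyConvertCap(str, dest):
--
--     Start = 0
--     End = len(str)
--     strArr = list(str)
--
--     while(Start < End):
--
--         if(strArr[Start] >= 'A')and(strArr[Start] <= 'Z'):
--
--             dest.append(strArr[Start])
--
--         elif(strArr[Start] >= 'a')and(strArr[Start] <= 'z'):
--
--             dest.append(chr(ord(strArr[Start]) - 32))
--
--         else:
--             dest.append(strArr[Start])
--
--         Start += 1
--
--     return ''.join(dest)
-- ===== SOURCE B (Python) =====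
-- # Table-driven rewrite: one translation table + str.translate, instead of a
-- # branch-per-character index loop. Mutates dest like A (extend vs per-char append).
-- _TABLE = {ord(c): ord(c) - 32 for c in 'abcdefghijklmnopqrstuvwxyz'}
--
-- def StrCpyConvertCap(str, dest):
--     result = str.translate(_TABLE)
--     dest.extend(result)
--     return ''.join(dest)
-- ===== Notes on version B (the rewrite author's own statement) =====
-- stated objective: idiomatic
-- what changed: Replaces the index-based while loop with A-Z/a-z range branches and per-character appends by a precomputed lowercase-to-uppercase translation table applied in one str.translate pass, then a single dest.extend.
import Mathlib
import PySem

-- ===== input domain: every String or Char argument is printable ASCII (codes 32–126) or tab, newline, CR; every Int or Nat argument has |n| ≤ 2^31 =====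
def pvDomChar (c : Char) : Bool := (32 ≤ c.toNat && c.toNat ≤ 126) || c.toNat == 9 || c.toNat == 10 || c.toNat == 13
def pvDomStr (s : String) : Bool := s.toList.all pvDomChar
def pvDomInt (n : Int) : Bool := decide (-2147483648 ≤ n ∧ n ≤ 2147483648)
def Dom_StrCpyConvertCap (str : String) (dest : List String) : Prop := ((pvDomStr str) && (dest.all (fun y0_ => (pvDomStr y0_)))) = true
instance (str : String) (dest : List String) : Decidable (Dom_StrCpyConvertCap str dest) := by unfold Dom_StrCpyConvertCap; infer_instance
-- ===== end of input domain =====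

-- B replaces A's branch-per-character index loop by a precomputed lowercase→uppercase translation
-- table applied in one str.translate pass (idiomatic, table-driven). Return-value equivalence:
-- both Pythons also mutate dest identically (per-char appends vs extend with the same characters).

-- ===== PORT A =====
-- the while(Start < End) loop: structural recursion on End - Start over the same state (Start, dest)
def strCpyLoopA (strArr : List Char) (End : Nat) (Start : Nat) (dest : List String) : List String :=
  if _h : Start < End then
    let c := strArr.getD Start ' '   -- strArr[Start]; Start < End = len(strArr), always in range
    let dest' :=
      if 'A' ≤ c ∧ c ≤ 'Z' then dest ++ [String.mk [c]]
      else if 'a' ≤ c ∧ c ≤ 'z' then dest ++ [String.mk [Char.ofNat (c.toNat - 32)]]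
      else dest ++ [String.mk [c]]
    strCpyLoopA strArr End (Start + 1) dest'
  else dest
termination_by End - Start

def StrCpyConvertCap (str : String) (dest : List String) : String :=
  PySem.Str.join "" (strCpyLoopA str.toList str.toList.length 0 dest)

-- ===== PORT B =====
-- _TABLE = {ord(c): ord(c) - 32 for c in 'abcdefghijklmnopqrstuvwxyz'}
def pvUpperTable : PySem.Dict Int Int :=
  "abcdefghijklmnopqrstuvwxyz".toList.foldl
    (fun d c => d.insert (c.toNat : Int) ((c.toNat : Int) - 32)) PySem.Dict.empty

-- str.translate(_TABLE) on one code point: chr(_TABLE.get(ord(c), ord(c)))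
def pvTranslateChar (c : Char) : Char :=
  Char.ofNat ((pvUpperTable.getD (c.toNat : Int) (c.toNat : Int)).toNat)

def StrCpyConvertCap_alt (str : String) (dest : List String) : String :=
  let result := str.toList.map pvTranslateChar                       -- result = str.translate(_TABLE)
  PySem.Str.join "" (dest ++ result.map (fun c => String.mk [c]))    -- dest.extend(result); ''.join(dest)

-- ===== PRECONDITION & SPEC =====
def Spec_StrCpyConvertCap (str : String) (dest : List String) (out : String) : Prop := out = StrCpyConvertCap_alt str dest
instance (str : String) (dest : List String) (out : String) : Decidable (Spec_StrCpyConvertCap str dest out) := by unfold Spec_StrCpyConvertCap; infer_instance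

-- ===== CLAIM (what is proved, stated in full; the proofs are below) =====
def Claim_equal_StrCpyConvertCap : Prop := ∀ (str : String) (dest : List String), Dom_StrCpyConvertCap str dest → Spec_StrCpyConvertCap str dest (StrCpyConvertCap str dest)

-- ===== LEMMAS AND PROOFS =====

-- A's per-character appended string
def pvCharA (c : Char) : String :=
  if 'A' ≤ c ∧ c ≤ 'Z' then String.mk [c]
  else if 'a' ≤ c ∧ c ≤ 'z' then String.mk [Char.ofNat (c.toNat - 32)]
  else String.mk [c]

lemma pvUpperTable_eq : pvUpperTable = PySem.Dict.mk
    [(97, 65), (98, 66), (99, 67), (100, 68), (101, 69), (102, 70), (103, 71), (104, 72),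
     (105, 73), (106, 74), (107, 75), (108, 76), (109, 77), (110, 78), (111, 79), (112, 80),
     (113, 81), (114, 82), (115, 83), (116, 84), (117, 85), (118, 86), (119, 87), (120, 88),
     (121, 89), (122, 90)] := by
  apply PySem.Dict.ext
  decide

lemma pvTranslateChar_eq (c : Char) :
    pvTranslateChar c = if 97 ≤ c.toNat ∧ c.toNat ≤ 122 then Char.ofNat (c.toNat - 32) else c := by
  unfold pvTranslateChar
  rw [pvUpperTable_eq]
  simp only [PySem.Dict.getD_eq_get?_getD, PySem.Dict.get?_mk_cons]
  by_cases h : 97 ≤ c.toNat ∧ c.toNat ≤ 122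
  · obtain ⟨h1, h2⟩ := h
    interval_cases hn : c.toNat <;> simp_all
  · push Not at h
    simp only [beq_iff_eq]
    rw [if_neg (by omega)]
    rw [if_neg (by omega)]
    rw [if_neg (by omega)]
    rw [if_neg (by omega)]
    rw [if_neg (by omega)]
    rw [if_neg (by omega)]
    rw [if_neg (by omega)]
    rw [if_neg (by omega)]
    rw [if_neg (by omega)]
    rw [if_neg (by omega)]
    rw [if_neg (by omega)]
    rw [if_neg (by omega)]
    rw [if_neg (by omega)]
    rw [if_neg (by omega)]
    rw [if_neg (by omega)]
    rw [if_neg (by omega)]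
    rw [if_neg (by omega)]
    rw [if_neg (by omega)]
    rw [if_neg (by omega)]
    rw [if_neg (by omega)]
    rw [if_neg (by omega)]
    rw [if_neg (by omega)]
    rw [if_neg (by omega)]
    rw [if_neg (by omega)]
    rw [if_neg (by omega)]
    rw [if_neg (by omega)]
    simp [PySem.Dict.get?]
    intro h1 h2
    exact absurd h2 (by omega)

lemma pvCharA_eq_translate (c : Char) : pvCharA c = String.mk [pvTranslateChar c] := by
  unfold pvCharA
  rw [pvTranslateChar_eq]
  simp only [show ∀ a b : Char, (a ≤ b) = (a.toNat ≤ b.toNat) from fun a b => propext Iff.rfl,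
             show 'A'.toNat = 65 from rfl, show 'Z'.toNat = 90 from rfl,
             show 'a'.toNat = 97 from rfl, show 'z'.toNat = 122 from rfl]
  split_ifs <;> first | rfl | omega

lemma strCpyLoopA_eq (arr : List Char) (s : Nat) (dest : List String) :
    strCpyLoopA arr arr.length s dest = dest ++ (arr.drop s).map pvCharA := by
  suffices H : ∀ n s dest, arr.length - s = n →
      strCpyLoopA arr arr.length s dest = dest ++ (arr.drop s).map pvCharA from
    H (arr.length - s) s dest rfl
  intro n
  induction n with
  | zero =>
    intro s dest h
    rw [strCpyLoopA, dif_neg (by omega)]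
    simp [List.drop_eq_nil_of_le (by omega : arr.length ≤ s)]
  | succ n ih =>
    intro s dest h
    have hs : s < arr.length := by omega
    rw [strCpyLoopA, dif_pos hs]
    have hget : arr.getD s ' ' = arr[s] := List.getD_eq_getElem arr ' ' hs
    rw [ih (s + 1) _ (by omega)]
    rw [List.drop_eq_getElem_cons hs]
    simp only [hget, List.map_cons, pvCharA]
    split_ifs <;> simp

-- ===== VERDICT (by name: the statement is the Claim_ definition above) =====
theorem StrCpyConvertCap_spec : Claim_equal_StrCpyConvertCap := by
  intro str dest _
  unfold Spec_StrCpyConvertCap StrCpyConvertCap StrCpyConvertCap_alt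
  rw [strCpyLoopA_eq,
      show pvCharA = fun c => String.mk [pvTranslateChar c] from funext pvCharA_eq_translate]
  simp [List.map_map, Function.comp_def]
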